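-- pv_equiv track=rewrite | github.com/biojuho/vibe-coding | workspace/execution/content_db.py | _derive_next_action
-- ===== SOURCE A (Python) =====
-- def _derive_next_action(issues: list[str]) -> str:
--     if not issues:
--         return "렌더 실행 가능"
--     if any(issue.startswith("setup:") for issue in issues):
--         return "채널 설정 저장"
--     if any("brand_asset_missing" in issue for issue in issues):
--         return "브랜드 에셋 생성"
--     if any("bgm_missing" in issue for issue in issues):
--         return "BGM 추가 또는 스킵 확인"
--     if any("failed_jobs" in issue for issue in issues):
--         return "실패 건 확인"
--     return "운영 상태 점검"
-- ===== SOURCE B (Python) =====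
-- def _derive_next_action(issues: list[str]) -> str:
--     if not issues:
--         return "렌더 실행 가능"
--     has_setup = has_brand = has_bgm = has_failed = False
--     for issue in issues:
--         has_setup = has_setup or issue.startswith("setup:")
--         has_brand = has_brand or ("brand_asset_missing" in issue)
--         has_bgm = has_bgm or ("bgm_missing" in issue)
--         has_failed = has_failed or ("failed_jobs" in issue)
--     if has_setup:
--         return "채널 설정 저장"
--     if has_brand:
--         return "브랜드 에셋 생성"
--     if has_bgm:
--         return "BGM 추가 또는 스킵 확인"
--     if has_failed:
--         return "실패 건 확인"
--     return "운영 상태 점검"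
-- ===== Notes on version B (the rewrite author's own statement) =====
-- stated objective: alternative
-- what changed: Replaces four separate any()-scans over the issue list with a single pass that accumulates four boolean flags, followed by one priority-ladder decision on the flags.
import Mathlib
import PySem

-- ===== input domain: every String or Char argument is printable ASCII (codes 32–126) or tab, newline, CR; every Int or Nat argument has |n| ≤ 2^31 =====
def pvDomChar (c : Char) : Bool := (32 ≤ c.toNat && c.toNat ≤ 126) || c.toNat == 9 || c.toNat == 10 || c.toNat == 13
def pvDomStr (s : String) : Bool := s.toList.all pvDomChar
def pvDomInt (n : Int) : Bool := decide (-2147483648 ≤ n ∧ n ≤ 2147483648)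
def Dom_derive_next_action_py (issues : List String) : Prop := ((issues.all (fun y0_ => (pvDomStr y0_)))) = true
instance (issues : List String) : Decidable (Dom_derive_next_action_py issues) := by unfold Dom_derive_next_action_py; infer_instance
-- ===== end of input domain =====

-- ===== PORT A =====
-- One honest line: B makes a single pass accumulating four flags instead of A's four any()-scans (same cost class; alternative decomposition).
def derive_next_action_py (issues : List String) : String :=
  if issues.isEmpty then "렌더 실행 가능"
  else if issues.any (fun issue => PySem.Str.startswith issue "setup:") then "채널 설정 저장"
  else if issues.any (fun issue => PySem.Str.isIn "brand_asset_missing" issue) then "브랜드 에셋 생성"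
  else if issues.any (fun issue => PySem.Str.isIn "bgm_missing" issue) then "BGM 추가 또는 스킵 확인"
  else if issues.any (fun issue => PySem.Str.isIn "failed_jobs" issue) then "실패 건 확인"
  else "운영 상태 점검"

-- ===== PORT B =====
def derive_next_action_py_alt (issues : List String) : String :=
  if issues.isEmpty then "렌더 실행 가능"
  else
    let flags := issues.foldl
      (fun (acc : Bool × Bool × Bool × Bool) issue =>
        (acc.1 || PySem.Str.startswith issue "setup:",
         acc.2.1 || PySem.Str.isIn "brand_asset_missing" issue,
         acc.2.2.1 || PySem.Str.isIn "bgm_missing" issue,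
         acc.2.2.2 || PySem.Str.isIn "failed_jobs" issue))
      (false, false, false, false)
    if flags.1 then "채널 설정 저장"
    else if flags.2.1 then "브랜드 에셋 생성"
    else if flags.2.2.1 then "BGM 추가 또는 스킵 확인"
    else if flags.2.2.2 then "실패 건 확인"
    else "운영 상태 점검"

-- ===== PRECONDITION & SPEC =====
def Spec_derive_next_action_py (issues : List String) (out : String) : Prop := out = derive_next_action_py_alt issues
instance (issues : List String) (out : String) : Decidable (Spec_derive_next_action_py issues out) := by unfold Spec_derive_next_action_py; infer_instance

-- ===== CLAIM (what is proved, stated in full; the proofs are below) =====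
def Claim_equal_derive_next_action_py : Prop := ∀ (issues : List String), Dom_derive_next_action_py issues → Spec_derive_next_action_py issues (derive_next_action_py issues)

-- ===== LEMMAS AND PROOFS =====

theorem pv_flags (issues : List String) (a b c d : Bool) :
    issues.foldl
      (fun (acc : Bool × Bool × Bool × Bool) issue =>
        (acc.1 || PySem.Str.startswith issue "setup:",
         acc.2.1 || PySem.Str.isIn "brand_asset_missing" issue,
         acc.2.2.1 || PySem.Str.isIn "bgm_missing" issue,
         acc.2.2.2 || PySem.Str.isIn "failed_jobs" issue))
      (a, b, c, d)
    = (a || issues.any (fun issue => PySem.Str.startswith issue "setup:"),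
       b || issues.any (fun issue => PySem.Str.isIn "brand_asset_missing" issue),
       c || issues.any (fun issue => PySem.Str.isIn "bgm_missing" issue),
       d || issues.any (fun issue => PySem.Str.isIn "failed_jobs" issue)) := by
  induction issues generalizing a b c d with
  | nil => simp
  | cons x xs ih =>
    simp only [List.foldl_cons, List.any_cons, ih, Bool.or_assoc]

-- ===== VERDICT (by name: the statement is the Claim_ definition above) =====
theorem derive_next_action_py_spec : Claim_equal_derive_next_action_py := by
  intro issues _
  unfold Spec_derive_next_action_py derive_next_action_py derive_next_action_py_alt
  simp only [pv_flags, Bool.false_or]
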